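-- pv_equiv track=rewrite | github.com/yamunasoftware/WhatFeed | src/similarity.py | index_order
-- ===== SOURCE A (Python) =====
-- def index_order(counts):
--   local_counts = counts
--   indices = []
--   i = 0
--
--   while i < len(counts):
--     value, index = find_largest_index(local_counts)
--     local_counts = remove_index(local_counts, index)
--     indices.append(counts.index(value))
--     i += 1
--   return indices
--
-- def find_largest_index(counts):
--   value = 0
--   index = 0
--
--   i = 0
--   while i < len(counts):
--     if i == 0:
--       value = counts[i]
--       index = i
--     elif counts[i] > value:
--       value = counts[i]
--       index = i
--     i += 1
--   return value, index
--
-- def remove_index(array, index):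
--   local_array = []
--   i = 0
--
--   while i < len(array):
--     if i != index:
--       local_array.append(array[i])
--     i += 1
--   return local_array
-- ===== SOURCE B (Python) =====
-- def index_order(counts):
--   first = {}
--   for i, v in enumerate(counts):
--     if v not in first:
--       first[v] = i
--   return [first[v] for v in sorted(counts, reverse=True)]
-- ===== Notes on version B (the rewrite author's own statement) =====
-- stated objective: faster
-- what changed: A runs a quadratic selection loop (repeatedly scan for the max, rebuild the list without it, and re-scan counts with list.index); B sorts the values descending once and maps each through a first-occurrence-index dictionary built in one pass.
import Mathlib
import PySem

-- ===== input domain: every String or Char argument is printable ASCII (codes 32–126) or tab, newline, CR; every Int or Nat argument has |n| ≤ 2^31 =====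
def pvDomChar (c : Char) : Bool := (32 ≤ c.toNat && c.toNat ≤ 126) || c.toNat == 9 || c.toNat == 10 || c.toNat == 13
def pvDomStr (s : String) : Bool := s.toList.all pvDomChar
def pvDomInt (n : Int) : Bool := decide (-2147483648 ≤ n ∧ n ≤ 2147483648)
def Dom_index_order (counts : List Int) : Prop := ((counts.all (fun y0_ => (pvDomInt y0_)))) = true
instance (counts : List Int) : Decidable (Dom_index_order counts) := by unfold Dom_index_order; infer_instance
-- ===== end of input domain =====

-- B replaces A's quadratic selection loop by one descending sort plus a first-occurrence-index dict (objective: faster).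

-- ===== PORT A =====
-- helper find_largest_index; the 'while i < len(counts): … i += 1' loop is a fold over range(len(counts)) with the same (value, index) state
def find_largest_index (counts : List Int) : Int × Nat :=
  (List.range counts.length).foldl
    (fun (s : Int × Nat) i =>
      if i = 0 then (counts.getD i 0, i)
      else if counts.getD i 0 > s.1 then (counts.getD i 0, i)
      else s)
    (0, 0)

-- helper remove_index; same while-loop shape, accumulator local_array
def remove_index (array : List Int) (index : Nat) : List Int :=
  (List.range array.length).foldl
    (fun acc i => if i ≠ index then acc ++ [array.getD i 0] else acc) []

-- main loop: i runs from 0 to len(counts); state is (local_counts, indices).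
-- counts.index(value): value is always a member here, so the none branch of index? is unreachable (getD 0 is a dead default).
def index_order (counts : List Int) : List Int :=
  ((List.range counts.length).foldl
    (fun (s : List Int × List Int) _ =>
      let p := find_largest_index s.1
      (remove_index s.1 p.2,
       s.2 ++ [(((PySem.List.index? counts p.1).getD 0 : Nat) : Int)]))
    (counts, [])).2

-- ===== PORT B =====
-- first-occurrence dict built over enumerate(counts), then one descending sort; first[v] is always present (getD 0 dead default)
def index_order_alt (counts : List Int) : List Int :=
  let first : PySem.Dict Int Int :=
    (PySem.List.enumerate counts).foldl
      (fun d p => if d.contains p.2 = false then d.insert p.2 p.1 else d)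
      PySem.Dict.empty
  (PySem.List.sorted counts (fun x => x) true).map
    (fun v => (first.get? v).getD 0)

-- ===== PRECONDITION & SPEC =====
def Spec_index_order (counts : List Int) (out : List Int) : Prop := out = index_order_alt counts
instance (counts : List Int) (out : List Int) : Decidable (Spec_index_order counts out) := by unfold Spec_index_order; infer_instance

-- ===== CLAIM (what is proved, stated in full; the proofs are below) =====
def Claim_equal_index_order : Prop := ∀ (counts : List Int), Dom_index_order counts → Spec_index_order counts (index_order counts)

-- ===== LEMMAS AND PROOFS =====

-- the value A appends for a selected value v: first index of v in counts (as Int)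
def firstIdx (counts : List Int) (v : Int) : Int := (((PySem.List.index? counts v).getD 0 : Nat) : Int)

-- B's dict lookup is firstIdx
lemma dict_fold_get (l : List Int) : ∀ (s : Int) (d : PySem.Dict Int Int) (v : Int),
    ((PySem.List.enumerate l s).foldl
      (fun d p => if d.contains p.2 = false then d.insert p.2 p.1 else d) d).get? v
    = (d.get? v).or ((PySem.List.index? l v).map (fun k => s + (k : Int))) := by
  induction l with
  | nil =>
    intro s d v
    simp [PySem.List.enumerate_nil, PySem.List.index?_eq_idxOf?]
  | cons x xs ih =>
    intro s d v
    rw [PySem.List.enumerate_cons, List.foldl_cons, ih]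
    by_cases hb : d.contains x = false
    · rw [if_pos hb]
      by_cases hv : v = x
      · subst hv
        have hd : d.get? v = none := by
          have h := PySem.Dict.contains_eq_isSome_get? d v
          rw [hb] at h
          cases hq : d.get? v
          · rfl
          · rw [hq] at h; simp at h
        rw [PySem.Dict.get?_insert_self, hd, PySem.List.index?_cons_self]
        simp
      · rw [PySem.Dict.get?_insert_of_ne d s hv, PySem.List.index?_cons_of_ne xs (Ne.symm hv)]
        cases hq : d.get? v <;> cases h : PySem.List.index? xs v <;>
          simp <;> push_cast <;> ring
    · rw [if_neg hb]
      have hbt : d.contains x = true := by revert hb; cases d.contains x <;> simp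
      by_cases hv : v = x
      · subst hv
        obtain ⟨w, hw⟩ : ∃ w, d.get? v = some w := by
          have h := PySem.Dict.contains_eq_isSome_get? d v
          rw [hbt] at h
          cases hq : d.get? v
          · rw [hq] at h; simp at h
          · exact ⟨_, rfl⟩
        rw [hw]; simp
      · rw [PySem.List.index?_cons_of_ne xs (Ne.symm hv)]
        cases hq : d.get? v <;> cases h : PySem.List.index? xs v <;>
          simp <;> push_cast <;> ring

lemma alt_eq_map_firstIdx (counts : List Int) :
    index_order_alt counts = (PySem.List.sorted counts (fun x => x) true).map (firstIdx counts) := by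
  have h : ∀ v : Int,
      (((PySem.List.enumerate counts).foldl
        (fun d p => if d.contains p.2 = false then d.insert p.2 p.1 else d)
        PySem.Dict.empty).get? v).getD 0 = firstIdx counts v := by
    intro v
    rw [dict_fold_get, PySem.Dict.get?_empty]
    simp only [firstIdx]
    cases h : PySem.List.index? counts v <;> simp
  simp only [index_order_alt]
  exact List.map_congr_left (fun v _ => h v)

-- remove_index is take/drop around the removed position
lemma map_getD_range' (l : List Int) : ∀ (b a : Nat), a + b ≤ l.length →
    (List.range' a b).map (fun i => l.getD i 0) = (l.drop a).take b := by
  intro b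
  induction b with
  | zero => intro a _; simp
  | succ b ih =>
    intro a h
    have ha : a < l.length := by omega
    rw [List.range'_succ, List.map_cons, List.getD_eq_getElem l 0 ha,
      List.drop_eq_getElem_cons ha, List.take_succ_cons, ih (a + 1) (by omega)]

lemma remove_fold (l : List Int) (j : Nat) : ∀ (r : List Nat) (acc : List Int),
    r.foldl (fun acc i => if i ≠ j then acc ++ [l.getD i 0] else acc) acc
    = acc ++ (r.filter (fun i => i != j)).map (fun i => l.getD i 0) := by
  intro r
  induction r with
  | nil => intro acc; simp
  | cons i r ih =>
    intro acc
    rw [List.foldl_cons, List.filter_cons]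
    by_cases h : i = j
    · rw [if_neg (by simp [h] : ¬(i ≠ j)), show (i != j) = false by simp [h]]
      simpa using ih acc
    · rw [if_pos h, show (i != j) = true by simpa using h, if_pos rfl,
        ih (acc ++ [l.getD i 0]), List.map_cons, List.append_assoc, List.singleton_append]

lemma remove_index_eq (l : List Int) (j : Nat) (hj : j < l.length) :
    remove_index l j = l.take j ++ l.drop (j + 1) := by
  unfold remove_index
  rw [remove_fold, List.nil_append]
  have h0 : List.range' 0 j 1 ++ List.range' (0 + 1 * j) (l.length - j) 1
      = List.range' 0 (j + (l.length - j)) 1 := List.range'_append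
  have h1 : (0 : Nat) + 1 * j = j := by omega
  have h2 : j + (l.length - j) = l.length := by omega
  rw [h1, h2] at h0
  rw [List.range_eq_range', ← h0, List.filter_append]
  have hf1 : (List.range' 0 j 1).filter (fun i => i != j) = List.range' 0 j 1 := by
    rw [List.filter_eq_self]
    intro a ha
    rw [List.mem_range'] at ha
    obtain ⟨i, hi, rfl⟩ := ha
    simp only [bne_iff_ne, ne_eq]; omega
  have h3 : l.length - j = (l.length - (j + 1)) + 1 := by omega
  rw [hf1, h3, List.range'_succ]
  have hf2 : (j :: List.range' (j + 1) (l.length - (j + 1)) 1).filter (fun i => i != j)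
      = List.range' (j + 1) (l.length - (j + 1)) 1 := by
    rw [List.filter_cons]
    simp only [bne_self_eq_false, if_false, Bool.false_eq_true]
    rw [List.filter_eq_self]
    intro a ha
    rw [List.mem_range'] at ha
    obtain ⟨i, hi, rfl⟩ := ha
    simp only [bne_iff_ne, ne_eq]; omega
  have h4 : (List.drop (j + 1) l).take (l.length - (j + 1)) = List.drop (j + 1) l :=
    List.take_of_length_le (by simp)
  rw [hf2, List.map_append, map_getD_range' l j 0 (by omega),
    map_getD_range' l (l.length - (j + 1)) (j + 1) (by omega), List.drop_zero, h4]

lemma perm_remove (l : List Int) (j : Nat) (hj : j < l.length) :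
    l.Perm (l.getD j 0 :: remove_index l j) := by
  rw [remove_index_eq l j hj, List.getD_eq_getElem l 0 hj]
  conv_lhs => rw [← List.take_append_drop j l, List.drop_eq_getElem_cons hj]
  exact List.perm_middle

-- the two loop shapes of port A, named for the proofs (definitionally the port's lambdas)
def flStep (l : List Int) : Int × Nat → Nat → Int × Nat := fun s i =>
  if i = 0 then (l.getD i 0, i)
  else if l.getD i 0 > s.1 then (l.getD i 0, i)
  else s

def flFold (l : List Int) (k : Nat) : Int × Nat := (List.range k).foldl (flStep l) (0, 0)

lemma fl_inv (l : List Int) : ∀ (k : Nat), 1 ≤ k → k ≤ l.length →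
    (flFold l k).2 < k ∧ l.getD (flFold l k).2 0 = (flFold l k).1 ∧
    ∀ t, t < k → l.getD t 0 ≤ (flFold l k).1 := by
  intro k
  induction k with
  | zero => intro h _; exact absurd h (by omega)
  | succ k ih =>
    intro _ hk1
    by_cases hk0 : k = 0
    · subst hk0
      have h1 : flFold l 1 = (l.getD 0 0, 0) := by
        simp [flFold, flStep, List.range_one]
      rw [h1]
      refine ⟨by omega, rfl, ?_⟩
      intro t ht
      have : t = 0 := by omega
      subst this; exact le_refl _
    · have h1k : 1 ≤ k := by omega
      obtain ⟨ha, hb, hc⟩ := ih h1k (by omega)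
      have hstep : flFold l (k + 1) = flStep l (flFold l k) k := by
        simp [flFold, List.range_succ]
      rw [hstep]
      unfold flStep
      rw [if_neg hk0]
      by_cases hgt : l.getD k 0 > (flFold l k).1
      · rw [if_pos hgt]
        refine ⟨by omega, rfl, ?_⟩
        intro t ht
        rcases Nat.lt_succ_iff_lt_or_eq.mp ht with h | h
        · exact le_trans (hc t h) (le_of_lt hgt)
        · subst h; exact le_refl _
      · rw [if_neg hgt]
        refine ⟨by omega, hb, ?_⟩
        intro t ht
        rcases Nat.lt_succ_iff_lt_or_eq.mp ht with h | h
        · exact hc t h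
        · subst h; exact not_lt.mp hgt

lemma find_largest_spec (l : List Int) (hl : l ≠ []) :
    (find_largest_index l).2 < l.length ∧
    l.getD (find_largest_index l).2 0 = (find_largest_index l).1 ∧
    ∀ x ∈ l, x ≤ (find_largest_index l).1 := by
  have hlen : 1 ≤ l.length := by
    cases l with
    | nil => exact absurd rfl hl
    | cons a t => simp
  have heq : find_largest_index l = flFold l l.length := rfl
  obtain ⟨h1, h2, h3⟩ := fl_inv l l.length hlen le_rfl
  refine ⟨by rw [heq]; exact h1, by rw [heq]; exact h2, ?_⟩
  intro x hx
  obtain ⟨t, ht, rfl⟩ := List.mem_iff_getElem.mp hx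
  rw [heq]
  have h4 := h3 t ht
  rwa [List.getD_eq_getElem l 0 ht] at h4

-- the main loop of port A, named (definitionally the port's lambda)
def ioStep (counts : List Int) : List Int × List Int → Nat → List Int × List Int :=
  fun s _ =>
    let p := find_largest_index s.1
    (remove_index s.1 p.2,
     s.2 ++ [(((PySem.List.index? counts p.1).getD 0 : Nat) : Int)])

def ioFold (counts : List Int) (k : Nat) : List Int × List Int :=
  (List.range k).foldl (ioStep counts) (counts, [])

lemma loop_inv (counts : List Int) : ∀ (k : Nat), k ≤ counts.length →
    ∃ vals : List Int,
      (ioFold counts k).2 = vals.map (firstIdx counts) ∧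
      (vals ++ (ioFold counts k).1).Perm counts ∧
      vals.Pairwise (fun a b => b ≤ a) ∧
      (∀ v ∈ vals, ∀ x ∈ (ioFold counts k).1, x ≤ v) ∧
      (ioFold counts k).1.length = counts.length - k := by
  intro k
  induction k with
  | zero =>
    intro _
    exact ⟨[], by simp [ioFold], by simp [ioFold], List.Pairwise.nil, by simp, by simp [ioFold]⟩
  | succ k ih =>
    intro hk1
    obtain ⟨vals, hacc, hperm, hpair, hub, hlen⟩ := ih (by omega)
    have hne : (ioFold counts k).1 ≠ [] := by
      intro h; rw [h] at hlen; simp at hlen; omega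
    obtain ⟨hjlt, hgv, hmax⟩ := find_largest_spec _ hne
    set L := (ioFold counts k).1 with hL
    set m := (find_largest_index L).1 with hm
    set j := (find_largest_index L).2 with hjd
    have hstep : ioFold counts (k + 1) = ioStep counts (ioFold counts k) k := by
      simp [ioFold, List.range_succ]
    have hstep1 : (ioFold counts (k + 1)).1 = remove_index L j := by rw [hstep]; rfl
    have hstep2 : (ioFold counts (k + 1)).2 = (ioFold counts k).2 ++ [firstIdx counts m] := by
      rw [hstep]; rfl
    have hmem : m ∈ L := by
      rw [← hgv, List.getD_eq_getElem L 0 hjlt]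
      exact List.getElem_mem hjlt
    have hpL : L.Perm (m :: remove_index L j) := by
      have h5 := perm_remove L j hjlt
      rwa [hgv] at h5
    refine ⟨vals ++ [m], ?_, ?_, ?_, ?_, ?_⟩
    · rw [hstep2, hacc, List.map_append]; rfl
    · rw [hstep1]
      have e : (vals ++ [m]) ++ remove_index L j = vals ++ (m :: remove_index L j) := by simp
      rw [e]
      exact (List.Perm.append_left vals hpL.symm).trans hperm
    · rw [List.pairwise_append]
      refine ⟨hpair, List.pairwise_singleton _ _, ?_⟩
      intro a ha b hb
      rw [List.mem_singleton] at hb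
      subst hb
      exact hub a ha m hmem
    · intro v hv x hx
      rw [hstep1] at hx
      have hxL : x ∈ L := hpL.mem_iff.mpr (List.mem_cons_of_mem m hx)
      rcases List.mem_append.mp hv with h | h
      · exact hub v h x hxL
      · rw [List.mem_singleton] at h; subst h; exact hmax x hxL
    · rw [hstep1, remove_index_eq L j hjlt]
      simp only [List.length_append, List.length_take, List.length_drop]
      omega

lemma index_order_eq_map (counts : List Int) :
    index_order counts = (PySem.List.sorted counts (fun x => x) true).map (firstIdx counts) := by
  obtain ⟨vals, hacc, hperm, hpair, _, hlen⟩ := loop_inv counts counts.length le_rfl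
  have h0 : (ioFold counts counts.length).1 = [] := by
    have h1 : (ioFold counts counts.length).1.length = 0 := by omega
    cases h2 : (ioFold counts counts.length).1
    · rfl
    · rw [h2] at h1; simp at h1
  rw [h0, List.append_nil] at hperm
  have hsperm := PySem.List.sorted_perm counts (fun x : Int => x) true
  have hspair := PySem.List.sorted_pairwise_rev counts (fun x : Int => x)
  have hvs : vals = PySem.List.sorted counts (fun x => x) true := by
    apply List.eq_of_perm_of_sorted (le := fun a b : Int => b ≤ a)
    · exact fun a b _ _ h1 h2 => le_antisymm h2 h1
    · exact hpair
    · exact hspair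
    · exact hperm.trans hsperm.symm
  show (ioFold counts counts.length).2 = _
  rw [hacc, hvs]

-- ===== VERDICT (by name: the statement is the Claim_ definition above) =====
theorem index_order_spec : Claim_equal_index_order := by
  intro counts _
  unfold Spec_index_order
  rw [index_order_eq_map, alt_eq_map_firstIdx]
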